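-- pv_equiv track=rewrite | github.com/pax6pax6/baseChanger | baseChanger.py | generalPAMFinder
-- ===== SOURCE A (Python) =====
-- def reverseComplemented(sequence):
--     reverseComplement = ""
--     sequence_upper = sequence[::-1].upper()
--     for nucleotide in sequence_upper:
--         if nucleotide == "A":
--             reverseComplement += "T"
--         elif nucleotide == "T":
--             reverseComplement += "A"
--         elif nucleotide == "C":
--             reverseComplement += "G"
--         elif nucleotide == "G":
--             reverseComplement += "C"
--     return reverseComplement
--
-- def generalPAMFinder(PAM, sequence):
--     R = ["A","G"]
--     Y = ["C","T"]
--     N = ["A","T","C","G"]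
--     fragment_indices = []
--     reverse_fragment_indices = []
--     PAM_upper = PAM.upper()
--     sequence_upper = sequence.upper()
--     reverse_sequence_upper = reverseComplemented(sequence).upper()
--
--     for increment in list(range((len(sequence_upper)-(len(PAM_upper)-1)))):
--         PAM_indices = [increment, increment + len(PAM_upper)]
--         fragment = sequence_upper[increment:increment + len(PAM_upper)]
--
--         n = 0
--         onOff = 0
--         for nucleotide in PAM_upper:
--             if nucleotide == "N":
--                 n += 1
--             elif nucleotide == "G" and fragment[n] == "G":
--                 n += 1
--             elif nucleotide == "R" and fragment[n] in R:
--                 n += 1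
--             elif nucleotide == "T" and fragment[n] == "T":
--                 n += 1
--             elif nucleotide == "Y" and fragment[n] in Y:
--                 n += 1
--             elif nucleotide == "C" and fragment[n] == "C":
--                 n += 1
--             else:
--                 n += 1
--                 onOff = 1
--         if onOff != 1:
--             fragment_indices.append(PAM_indices)
--         n += 1
--
--     for increment in list(range((len(reverse_sequence_upper)-(len(PAM_upper)-1)))):
--         PAM_indices = [increment, increment + len(PAM_upper)]
--         fragment = reverse_sequence_upper[increment:increment + len(PAM_upper)]
--
--         n = 0
--         onOff = 0
--         for nucleotide in PAM_upper:
--             if nucleotide == "N":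
--                 n += 1
--             elif nucleotide == "G" and fragment[n] == "G":
--                 n += 1
--             elif nucleotide == "R" and fragment[n] in R:
--                 n += 1
--             elif nucleotide == "T" and fragment[n] == "T":
--                 n += 1
--             elif nucleotide == "Y" and fragment[n] in Y:
--                 n += 1
--             elif nucleotide == "C" and fragment[n] == "C":
--                 n += 1
--             else:
--                 n += 1
--                 onOff = 1
--         if onOff != 1:
--             reverse_fragment_indices.append(PAM_indices)
--         n += 1
--
--     return fragment_indices, reverse_fragment_indices
-- ===== SOURCE B (Python) =====
-- def generalPAMFinder(PAM, sequence):
--     # Shift-And bit-parallel matcher: a single pass per strand over the text,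
--     # carrying a bitset of live partial matches instead of rescanning each window.
--     p = PAM.upper()
--     m = len(p)
--     comp = {"A": "T", "T": "A", "C": "G", "G": "C"}
--     seq_upper = sequence.upper()
--     rev = "".join(comp[c] for c in reversed(seq_upper) if c in comp)
--
--     def charmask(c):
--         b = 0
--         for j, pc in enumerate(p):
--             if (pc == "N"
--                     or (pc == "G" and c == "G")
--                     or (pc == "R" and (c == "A" or c == "G"))
--                     or (pc == "T" and c == "T")
--                     or (pc == "Y" and (c == "C" or c == "T"))
--                     or (pc == "C" and c == "C")):
--                 b |= 1 << j
--         return b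
--
--     def scan(s):
--         if m == 0:
--             return [[i, i] for i in range(len(s) + 1)]
--         cache = {}
--         D = 0
--         hit = 1 << (m - 1)
--         out = []
--         for i, c in enumerate(s):
--             bm = cache.get(c)
--             if bm is None:
--                 bm = cache[c] = charmask(c)
--             D = ((D << 1) | 1) & bm
--             if D & hit:
--                 st = i - m + 1
--                 out.append([st, st + m])
--         return out
--
--     return scan(seq_upper), scan(rev)
-- ===== Notes on version B (the rewrite author's own statement) =====
-- stated objective: alternative
-- what changed: A rechecks every length-m window character by character with an (n, onOff) state machine; B is a Shift-And bit-parallel matcher: one pass over each strand updating a bitset D = ((D<<1)|1) & mask(c) built from per-character class bitmasks (N matches everything, A matches nothing, exactly A's elif chain), emitting a window when bit m-1 is set.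
import Mathlib
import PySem

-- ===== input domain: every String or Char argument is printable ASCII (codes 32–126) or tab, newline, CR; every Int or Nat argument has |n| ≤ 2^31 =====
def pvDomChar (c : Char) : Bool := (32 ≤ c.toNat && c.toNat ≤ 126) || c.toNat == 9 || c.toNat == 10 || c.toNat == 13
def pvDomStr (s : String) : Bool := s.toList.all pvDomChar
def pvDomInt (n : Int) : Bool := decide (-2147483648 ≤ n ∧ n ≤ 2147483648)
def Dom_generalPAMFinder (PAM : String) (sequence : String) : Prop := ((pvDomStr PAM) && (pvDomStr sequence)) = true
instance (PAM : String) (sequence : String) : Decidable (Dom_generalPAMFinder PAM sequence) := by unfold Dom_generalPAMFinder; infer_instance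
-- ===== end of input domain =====

-- B replaces A's window-by-window rescan with a one-pass Shift-And bit-parallel matcher
-- (per-character class bitmasks); equal return value on all inputs.

-- ===== PORT A =====
-- sequence[::-1].upper() then the if/elif complement loop building a string
def pvRevCompStep (acc : List Char) (c : Char) : List Char :=
  if c = 'A' then acc ++ ['T']
  else if c = 'T' then acc ++ ['A']
  else if c = 'C' then acc ++ ['G']
  else if c = 'G' then acc ++ ['C']
  else acc

def reverseComplementedL (s : List Char) : List Char :=
  (PySem.Chars.upper s.reverse).foldl pvRevCompStep []

-- one step of A's inner `for nucleotide in PAM_upper`; state = (n, onOff).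
-- fragment[n] is always in range on every state A reaches (n < len(fragment)), so pyGetD's
-- default is never read; the if/elif chain is transliterated branch for branch.
def pvStepA (frag : List Char) (st : Int × Int) (nuc : Char) : Int × Int :=
  let fc := PySem.List.pyGetD frag st.1 ' '
  if nuc = 'N' then (st.1 + 1, st.2)
  else if nuc = 'G' ∧ fc = 'G' then (st.1 + 1, st.2)
  else if nuc = 'R' ∧ (fc = 'A' ∨ fc = 'G') then (st.1 + 1, st.2)
  else if nuc = 'T' ∧ fc = 'T' then (st.1 + 1, st.2)
  else if nuc = 'Y' ∧ (fc = 'C' ∨ fc = 'T') then (st.1 + 1, st.2)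
  else if nuc = 'C' ∧ fc = 'C' then (st.1 + 1, st.2)
  else (st.1 + 1, 1)

-- one of A's two identical `for increment in list(range(...))` loops
def pvScanA (p s : List Char) : List (List Int) :=
  (PySem.List.pyRange 0 ((s.length : Int) - ((p.length : Int) - 1)) 1).foldl
    (fun acc increment =>
      let PAMidx : List Int := [increment, increment + (p.length : Int)]
      let frag := PySem.List.slice s (some increment) (some (increment + (p.length : Int)))
      let r := p.foldl (pvStepA frag) (0, 0)
      if r.2 ≠ 1 then acc ++ [PAMidx] else acc)
    []

def generalPAMFinder (PAM : String) (sequence : String) : List (List Int) × List (List Int) :=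
  let PAMu := PySem.Chars.upper PAM.toList
  let su := PySem.Chars.upper sequence.toList
  let rsu := PySem.Chars.upper (reverseComplementedL sequence.toList)
  (pvScanA PAMu su, pvScanA PAMu rsu)

-- ===== PORT B =====
-- does PAM-class character pc accept sequence character c? ('N' = any, 'A' = none)
def pvOk (pc c : Char) : Bool :=
  pc = 'N' || (pc = 'G' && c = 'G') || (pc = 'R' && (c = 'A' || c = 'G'))
    || (pc = 'T' && c = 'T') || (pc = 'Y' && (c = 'C' || c = 'T')) || (pc = 'C' && c = 'C')

def pvComp? (c : Char) : Option Char :=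
  if c = 'A' then some 'T'
  else if c = 'T' then some 'A'
  else if c = 'C' then some 'G'
  else if c = 'G' then some 'C'
  else none

-- Source B's charmask; Source B's per-character dict is pure memoization of this function
def pvCharMask (p : List Char) (c : Char) : Nat :=
  p.zipIdx.foldl (fun b pj => if pvOk pj.1 c then b ||| (1 <<< pj.2) else b) 0

-- the body of Source B's scan loop; bit j of D = "the last j+1 characters match PAM[0..j]"
def pvStepB (p : List Char) (m : Nat) (st : Nat × List (List Int)) (ci : Char × Nat) :
    Nat × List (List Int) :=
  let D := ((st.1 <<< 1) ||| 1) &&& pvCharMask p ci.1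
  if D.testBit (m - 1) then
    (D, st.2 ++ [[(ci.2 : Int) - (m : Int) + 1, (ci.2 : Int) - (m : Int) + 1 + (m : Int)]])
  else (D, st.2)

def pvScanB (p s : List Char) : List (List Int) :=
  let m := p.length
  if m = 0 then (List.range (s.length + 1)).map (fun (i : Nat) => [(i : Int), (i : Int)])
  else (s.zipIdx.foldl (pvStepB p m) (0, [])).2

def generalPAMFinder_alt (PAM : String) (sequence : String) : List (List Int) × List (List Int) :=
  let p := PySem.Chars.upper PAM.toList
  let su := PySem.Chars.upper sequence.toList
  let rev := su.reverse.filterMap pvComp?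
  (pvScanB p su, pvScanB p rev)

-- ===== PRECONDITION & SPEC =====
def Spec_generalPAMFinder (PAM : String) (sequence : String) (out : List (List Int) × List (List Int)) : Prop := out = generalPAMFinder_alt PAM sequence
instance (PAM : String) (sequence : String) (out : List (List Int) × List (List Int)) : Decidable (Spec_generalPAMFinder PAM sequence out) := by unfold Spec_generalPAMFinder; infer_instance

-- ===== CLAIM (what is proved, stated in full; the proofs are below) =====
def Claim_equal_generalPAMFinder : Prop := ∀ (PAM : String) (sequence : String), Dom_generalPAMFinder PAM sequence → Spec_generalPAMFinder PAM sequence (generalPAMFinder PAM sequence)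

-- ===== LEMMAS AND PROOFS =====

-- window k of s matches pattern p
def pvGoodB (p s : List Char) (k : Nat) : Bool :=
  (List.range p.length).all (fun j => pvOk (p.getD j ' ') (s.getD (k + j) ' '))

-- the common specification of both scans
def pvWins (p s : List Char) : List (List Int) :=
  ((List.range (s.length + 1 - p.length)).filter (pvGoodB p s)).map
    (fun (i : Nat) => [(i : Int), (i : Int) + (p.length : Int)])

-- prefix of p of length j+1 matches s at window start i
def pvPrefB (p s : List Char) (i j : Nat) : Bool :=
  (List.range (j + 1)).all (fun t => pvOk (p.getD t ' ') (s.getD (i + t) ' '))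

-- ---- the two reverse complements agree ----

lemma pvRevCompStep_eq (acc : List Char) (c : Char) :
    pvRevCompStep acc c = acc ++ (pvComp? c).toList := by
  unfold pvRevCompStep pvComp?
  split_ifs <;> simp

lemma pvFoldRC (u : List Char) : ∀ acc, u.foldl pvRevCompStep acc = acc ++ u.filterMap pvComp? := by
  induction u with
  | nil => simp
  | cons c u ih =>
    intro acc
    simp only [List.foldl_cons, ih, pvRevCompStep_eq, List.filterMap_cons]
    cases h : pvComp? c <;> simp

lemma pvComp?_upper (c d : Char) (h : pvComp? c = some d) : PySem.Chars.upperChar d = d := by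
  unfold pvComp? at h
  split_ifs at h <;> simp_all <;> subst h <;> decide

lemma pvRevComp_eq (s : List Char) :
    PySem.Chars.upper (reverseComplementedL s) =
      (PySem.Chars.upper s).reverse.filterMap pvComp? := by
  unfold reverseComplementedL PySem.Chars.upper
  rw [pvFoldRC, List.nil_append, List.map_filterMap, ← List.map_reverse]
  apply List.filterMap_congr
  intro c _
  cases h : pvComp? c with
  | none => simp
  | some d => simp [pvComp?_upper c d h]

-- ---- A's scan equals pvWins ----

lemma pvStepA_char (frag : List Char) (st : Int × Int) (c : Char) :
    pvStepA frag st c = (st.1 + 1, if pvOk c (PySem.List.pyGetD frag st.1 ' ') then st.2 else 1) := by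
  unfold pvStepA
  set fc := PySem.List.pyGetD frag st.1 ' ' with hfc
  by_cases hN : c = 'N'
  · subst hN; simp [pvOk]
  · by_cases hG : c = 'G'
    · subst hG; by_cases h : fc = 'G' <;> simp_all [pvOk]
    · by_cases hR : c = 'R'
      · subst hR; by_cases h1 : fc = 'A' <;> by_cases h2 : fc = 'G' <;> simp_all [pvOk]
      · by_cases hT : c = 'T'
        · subst hT; by_cases h : fc = 'T' <;> simp_all [pvOk]
        · by_cases hY : c = 'Y'
          · subst hY; by_cases h1 : fc = 'C' <;> by_cases h2 : fc = 'T' <;> simp_all [pvOk]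
          · by_cases hC : c = 'C'
            · subst hC; by_cases h : fc = 'C' <;> simp_all [pvOk]
            · simp_all [pvOk]

lemma pvFoldA_one (p : List Char) (frag : List Char) (n : Int) :
    p.foldl (pvStepA frag) (n, 1) = (n + p.length, 1) := by
  induction p generalizing n with
  | nil => simp
  | cons c p ih =>
    simp only [List.foldl_cons, pvStepA_char]
    split_ifs <;> simp [ih] <;> omega

lemma pvFoldA_zero (p frag : List Char) (n : Nat) :
    (p.foldl (pvStepA frag) ((n : Int), 0)).2 =
      if (List.range p.length).all (fun j => pvOk (p.getD j ' ') (frag.getD (n + j) ' ')) then 0 else 1 := by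
  induction p generalizing n with
  | nil => simp
  | cons c p ih =>
    simp only [List.foldl_cons, pvStepA_char, PySem.List.pyGetD_natCast]
    by_cases h : pvOk c (frag.getD n ' ')
    · rw [if_pos h]
      have : ((n : Int) + 1) = ((n + 1 : Nat) : Int) := by push_cast; ring
      rw [this, ih]
      have hcond : ((List.range (c :: p).length).all
            (fun j => pvOk ((c :: p).getD j ' ') (frag.getD (n + j) ' ')))
          = (pvOk c (frag.getD n ' ') &&
             (List.range p.length).all (fun j => pvOk (p.getD j ' ') (frag.getD (n + 1 + j) ' '))) := by
        rw [List.length_cons, List.range_succ_eq_map, List.all_cons, List.all_map]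
        have h0 : (c :: p).getD 0 ' ' = c := rfl
        rw [h0, Nat.add_zero]
        congr 1
        apply List.all_congr rfl
        intro j
        show pvOk ((c :: p).getD (j + 1) ' ') (frag.getD (n + (j + 1)) ' ') = _
        have e1 : (c :: p).getD (j + 1) ' ' = p.getD j ' ' := rfl
        have e2 : n + (j + 1) = n + 1 + j := by omega
        rw [e1, e2]
      rw [hcond, h]
      simp
    · rw [if_neg h, pvFoldA_one]
      have hx : (List.range (c :: p).length).all
          (fun j => pvOk ((c :: p).getD j ' ') (frag.getD (n + j) ' ')) = false := by
        rw [List.all_eq_false]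
        refine ⟨0, by simp, ?_⟩
        show ¬ pvOk ((c :: p).getD 0 ' ') (frag.getD (n + 0) ' ') = true
        simpa using h
      rw [hx]
      simp

lemma pvFrag_getD (s : List Char) (k m j : Nat) (hj : j < m) (d : Char) :
    ((s.drop k).take m).getD j d = s.getD (k + j) d := by
  rw [List.getD_eq_getElem?_getD, List.getD_eq_getElem?_getD, List.getElem?_take, if_pos hj,
    List.getElem?_drop]

lemma pvScanA_eq_wins (p s : List Char) : pvScanA p s = pvWins p s := by
  unfold pvScanA
  rw [PySem.List.pyRange_one, List.foldl_map]
  have ht : ((((s.length : Int) - ((p.length : Int) - 1)) - 0)).toNat = s.length + 1 - p.length := by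
    omega
  rw [ht]
  rw [PySem.List.foldl_congr_mem _ _
      (fun acc (k : Nat) => if pvGoodB p s k then acc ++ [[(k : Int), (k : Int) + (p.length : Int)]] else acc) _
      ?_]
  · rw [PySem.List.foldl_append_if (pvGoodB p s)
      (fun k => [(k : Int), (k : Int) + (p.length : Int)])]
    unfold pvWins
    rw [List.nil_append]
  · intro acc k _
    simp only [zero_add]
    rw [PySem.List.slice_natCast_add s k p.length]
    have hz := pvFoldA_zero p (List.take p.length (List.drop k s)) 0
    rw [Nat.cast_zero] at hz
    rw [hz]
    have hall : (List.range p.length).all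
          (fun j => pvOk (p.getD j ' ') (((s.drop k).take p.length).getD (0 + j) ' '))
        = pvGoodB p s k := by
      unfold pvGoodB
      rw [Bool.eq_iff_iff, List.all_eq_true, List.all_eq_true]
      constructor
      · intro h j hj
        have hj' := List.mem_range.mp hj
        have := h j hj
        rwa [zero_add, pvFrag_getD s k p.length j hj'] at this
      · intro h j hj
        have hj' := List.mem_range.mp hj
        have := h j hj
        rwa [zero_add, pvFrag_getD s k p.length j hj']
    rw [hall]
    by_cases hg : pvGoodB p s k <;> simp [hg]

-- ---- B's scan equals pvWins ----

lemma pvMaskFold_testBit (c : Char) (ps : List (Char × Nat)) (b : Nat) (j : Nat) :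
    ((ps.foldl (fun b pj => if pvOk pj.1 c then b ||| (1 <<< pj.2) else b) b).testBit j)
      = (b.testBit j || ps.any (fun pj => pvOk pj.1 c && pj.2 == j)) := by
  induction ps generalizing b with
  | nil => simp
  | cons q ps ih =>
    simp only [List.foldl_cons, List.any_cons]
    by_cases hq : pvOk q.1 c
    · rw [if_pos hq, ih, Nat.testBit_or, Nat.shiftLeft_eq, one_mul, Nat.testBit_two_pow]
      have hb : (q.2 == j) = decide (q.2 = j) := by by_cases hj : q.2 = j <;> simp [hj]
      rw [hb]
      by_cases hj : q.2 = j
      · simp only [hj, decide_true, Bool.true_or, Bool.or_true, Bool.true_eq]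
        simp [hq]
      · simp [hj]
    · rw [if_neg hq, ih]
      simp [hq]

lemma pvCharMask_testBit (p : List Char) (c : Char) (j : Nat) :
    (pvCharMask p c).testBit j = (decide (j < p.length) && pvOk (p.getD j ' ') c) := by
  unfold pvCharMask
  rw [pvMaskFold_testBit, Nat.zero_testBit, Bool.false_or]
  rw [Bool.eq_iff_iff, List.any_eq_true]
  constructor
  · rintro ⟨pj, hmem, hok⟩
    obtain ⟨h1, h2, h3⟩ := List.mem_zipIdx hmem
    obtain ⟨hok1, hok2⟩ := Bool.and_eq_true_iff.mp hok
    have hj : pj.2 = j := by simpa using hok2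
    have hlt : j < p.length := by omega
    have : pj.1 = p[j] := by subst hj; simpa using h3
    simp only [hlt, decide_true, Bool.true_and]
    rw [List.getD_eq_getElem?_getD, List.getElem?_eq_getElem hlt]
    rw [this] at hok1
    simpa using hok1
  · intro h
    obtain ⟨hlt, hok⟩ := Bool.and_eq_true_iff.mp h
    have hlt' : j < p.length := of_decide_eq_true hlt
    refine ⟨(p[j], j), ?_, ?_⟩
    · have hz : j < p.zipIdx.length := by simpa using hlt'
      have he : p.zipIdx[j]'hz = (p[j], 0 + j) := List.getElem_zipIdx hz
      rw [Nat.zero_add] at he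
      exact he ▸ List.getElem_mem hz
    · simp only [beq_self_eq_true, Bool.and_true]
      rw [List.getD_eq_getElem?_getD, List.getElem?_eq_getElem hlt'] at hok
      simpa using hok

lemma pvPrefB_succ (p s : List Char) (i j : Nat) :
    pvPrefB p s i (j + 1) = (pvPrefB p s i j && pvOk (p.getD (j + 1) ' ') (s.getD (i + (j + 1)) ' ')) := by
  simp [pvPrefB, List.range_succ, Bool.and_assoc]

lemma pvGetD_append_left (l : List Char) (x : Char) (i : Nat) (hi : i < l.length) (d : Char) :
    (l ++ [x]).getD i d = l.getD i d := by
  rw [List.getD_eq_getElem?_getD, List.getD_eq_getElem?_getD, List.getElem?_append_left hi]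

lemma pvGetD_append_len (l : List Char) (x : Char) (d : Char) :
    (l ++ [x]).getD l.length d = x := by
  rw [List.getD_eq_getElem?_getD, List.getElem?_append_right (le_refl _)]
  simp

lemma pvPrefB_append_left (p l : List Char) (x : Char) (i j : Nat) (h : i + j < l.length) :
    pvPrefB p (l ++ [x]) i j = pvPrefB p l i j := by
  unfold pvPrefB
  rw [Bool.eq_iff_iff, List.all_eq_true, List.all_eq_true]
  constructor <;> intro hh t ht <;> have ht' := List.mem_range.mp ht <;> have := hh t ht
  · rwa [pvGetD_append_left l x _ (by omega)] at this
  · rwa [pvGetD_append_left l x _ (by omega)]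

lemma pvGoodB_append_left (p l : List Char) (x : Char) (k : Nat)
    (h : k + p.length ≤ l.length) :
    pvGoodB p (l ++ [x]) k = pvGoodB p l k := by
  unfold pvGoodB
  rw [Bool.eq_iff_iff, List.all_eq_true, List.all_eq_true]
  constructor <;> intro hh t ht <;> have ht' := List.mem_range.mp ht <;> have := hh t ht
  · rwa [pvGetD_append_left l x _ (by omega)] at this
  · rwa [pvGetD_append_left l x _ (by omega)]

lemma pvGoodB_eq_pref (p s : List Char) (k : Nat) (hm : 0 < p.length) :
    pvGoodB p s k = pvPrefB p s k (p.length - 1) := by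
  unfold pvGoodB pvPrefB
  rw [Nat.sub_add_cancel hm]

lemma pvWins_snoc (p l : List Char) (x : Char) :
    pvWins p (l ++ [x]) = pvWins p l ++
      (if p.length ≤ l.length + 1 ∧ pvGoodB p (l ++ [x]) (l.length + 1 - p.length) = true
       then [[((l.length + 1 - p.length : Nat) : Int),
              ((l.length + 1 - p.length : Nat) : Int) + (p.length : Int)]]
       else []) := by
  unfold pvWins
  by_cases hle : p.length ≤ l.length + 1
  · have hlen : (l ++ [x]).length + 1 - p.length = (l.length + 1 - p.length) + 1 := by
      simp; omega
    rw [hlen, List.range_succ, List.filter_append, List.map_append]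
    congr 1
    · have : ∀ k ∈ List.range (l.length + 1 - p.length),
          pvGoodB p (l ++ [x]) k = pvGoodB p l k := by
        intro k hk
        have hk' := List.mem_range.mp hk
        exact pvGoodB_append_left p l x k (by omega)
      rw [List.filter_congr this]
    · by_cases hg : pvGoodB p (l ++ [x]) (l.length + 1 - p.length) = true
      · rw [if_pos ⟨hle, hg⟩]
        simp [hg]
      · rw [if_neg (by tauto)]
        simp [Bool.eq_false_iff.mpr hg]
  · have h1 : (l ++ [x]).length + 1 - p.length = 0 := by simp; omega
    have h2 : l.length + 1 - p.length = 0 := by omega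
    rw [h1, h2, if_neg (by tauto)]
    simp

lemma pvFoldB (p : List Char) (hm : 0 < p.length) (s : List Char) (out0 : List (List Int)) :
    (∀ j, ((s.zipIdx.foldl (pvStepB p p.length) (0, out0)).1.testBit j)
        = (decide (j + 1 ≤ s.length) && decide (j < p.length)
            && pvPrefB p s (s.length - (j + 1)) j))
    ∧ (s.zipIdx.foldl (pvStepB p p.length) (0, out0)).2 = out0 ++ pvWins p s := by
  induction s using List.reverseRecOn generalizing out0 with
  | nil =>
    constructor
    · intro j; simp
    · simp [pvWins, Nat.sub_eq_zero_of_le hm]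
  | append_singleton l x ih =>
    have hzip : (l ++ [x]).zipIdx = l.zipIdx ++ [(x, l.length)] := by
      rw [List.zipIdx_append]; simp
    rw [hzip, List.foldl_append, List.foldl_cons, List.foldl_nil]
    obtain ⟨ihD, ihOut⟩ := ih out0
    set r := l.zipIdx.foldl (pvStepB p p.length) (0, out0) with hr
    have hbit : ∀ j, (((r.1 <<< 1) ||| 1) &&& pvCharMask p x).testBit j
        = (decide (j + 1 ≤ (l ++ [x]).length) && decide (j < p.length)
            && pvPrefB p (l ++ [x]) ((l ++ [x]).length - (j + 1)) j) := by
      intro j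
      rw [Nat.testBit_and, Nat.testBit_or, Nat.testBit_shiftLeft, pvCharMask_testBit]
      have h1 : Nat.testBit 1 j = decide (0 = j) := by
        simpa using (Nat.testBit_two_pow (n := 0) (m := j))
      rw [h1]
      rw [List.length_append, List.length_singleton]
      cases j with
      | zero =>
        have e0 : l.length + 1 - (0 + 1) = l.length := by omega
        rw [e0]
        have epref : pvPrefB p (l ++ [x]) l.length 0 = pvOk (p.getD 0 ' ') x := by
          simp [pvPrefB]
        rw [epref]
        simp
      | succ jj =>
        have e1 : decide (jj + 1 ≥ 1) = true := by simp
        have e2 : decide (0 = jj + 1) = false := by simp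
        rw [e1, e2]
        simp only [Bool.true_and, Bool.or_false, Nat.add_sub_cancel]
        rw [ihD jj]
        by_cases hlen : jj + 1 ≤ l.length
        · have e3 : decide (jj + 1 ≤ l.length) = true := by simp [hlen]
          have e4 : decide (jj + 1 + 1 ≤ l.length + 1) = true := by simp; omega
          rw [e3, e4]
          have e5 : l.length + 1 - (jj + 1 + 1) = l.length - (jj + 1) := by omega
          rw [e5]
          have e6 : pvPrefB p (l ++ [x]) (l.length - (jj + 1)) (jj + 1)
              = (pvPrefB p l (l.length - (jj + 1)) jj && pvOk (p.getD (jj + 1) ' ') x) := by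
            rw [pvPrefB_succ]
            have e7 : l.length - (jj + 1) + (jj + 1) = l.length := by omega
            rw [e7, pvGetD_append_len, pvPrefB_append_left p l x _ _ (by omega)]
          rw [e6]
          by_cases hjm : jj + 1 < p.length
          · have : jj < p.length := by omega
            simp [hjm, this]
          · have : decide (jj + 1 < p.length) = false := by simp [hjm]
            rw [this]
            simp
        · have e3 : decide (jj + 1 ≤ l.length) = false := by simp [hlen]
          have e4 : decide (jj + 1 + 1 ≤ l.length + 1) = false := by simp; omega
          rw [e3, e4]
          simp
    constructor
    · intro j
      have : (pvStepB p p.length r (x, l.length)).1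
          = ((r.1 <<< 1) ||| 1) &&& pvCharMask p x := by
        unfold pvStepB
        simp only []
        split <;> rfl
      rw [this]
      exact hbit j
    · unfold pvStepB
      simp only []
      rw [pvWins_snoc p l x, ← List.append_assoc, ← ihOut]
      have hb := hbit (p.length - 1)
      have em : p.length - 1 + 1 = p.length := by omega
      rw [em] at hb
      split
      · next hsp =>
        rw [hb] at hsp
        have h1 : p.length ≤ l.length + 1 := by
          by_contra hc
          simp only [List.length_append, List.length_singleton] at hsp
          have : decide (p.length ≤ l.length + 1) = false := by simp; omega
          rw [this] at hsp
          simp at hsp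
        have h2 : pvGoodB p (l ++ [x]) (l.length + 1 - p.length) = true := by
          rw [pvGoodB_eq_pref p _ _ hm]
          simp only [List.length_append, List.length_singleton] at hsp
          exact (Bool.and_eq_true_iff.mp hsp).2
        rw [if_pos ⟨h1, h2⟩]
        have hc1 : ((l.length : Int)) - (p.length : Int) + 1 = ((l.length + 1 - p.length : Nat) : Int) := by
          push_cast [h1]
          omega
        rw [hc1]
      · next hsp =>
        rw [hb] at hsp
        simp only [Bool.not_eq_true] at hsp
        rw [if_neg ?_]
        · simp
        · rintro ⟨h1, h2⟩
          simp only [List.length_append, List.length_singleton] at hsp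
          have e8 : decide (p.length ≤ l.length + 1) = true := by simp [h1]
          have e9 : decide (p.length - 1 < p.length) = true := by simp; omega
          rw [e8, e9] at hsp
          simp only [Bool.true_and] at hsp
          rw [pvGoodB_eq_pref p _ _ hm] at h2
          simp [h2] at hsp

lemma pvScanB_eq_wins (p s : List Char) : pvScanB p s = pvWins p s := by
  unfold pvScanB
  by_cases hm : p.length = 0
  · rw [if_pos hm]
    unfold pvWins
    rw [hm]
    have : pvGoodB p s = fun _ => true := by
      funext k
      obtain rfl : p = [] := List.length_eq_zero_iff.mp hm
      simp [pvGoodB]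
    rw [this]
    simp
  · rw [if_neg hm]
    exact ((pvFoldB p (by omega) s []).2).trans (by simp)

-- ===== VERDICT (by name: the statement is the Claim_ definition above) =====
theorem generalPAMFinder_spec : Claim_equal_generalPAMFinder := by
  intro PAM sequence _
  show _ = _
  simp only [generalPAMFinder, generalPAMFinder_alt, pvScanA_eq_wins, pvScanB_eq_wins,
    pvRevComp_eq]
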